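-- pv_equiv track=rewrite | github.com/JacobDreiling/googology | Googology.py | Hydra
-- ===== SOURCE A (Python) =====
-- def Hydra(n):
-- 	H=list(range(n+1))
-- 	k=0
-- 	while H:
-- 		k+=1
-- 		h=H.pop()
-- 		if h:
-- 			i=-1
-- 			while H[i]>=h:i-=1
-- 			H[i:]*=k+1
-- 	return k
-- ===== SOURCE B (Python) =====
-- def Hydra(n):
--     # Tree-structured simulation: the hydra is a forest of nested child-lists
--     # (a node is the list of its children) instead of a flat depth list.
--     def chop(t, k):
--         # t: a non-empty node (its children list); chop the last head in
--         # preorder inside t and return the list of nodes replacing t.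
--         last = t[-1]
--         if last:                      # descend towards the rightmost leaf
--             return [t[:-1] + chop(last, k)]
--         else:                         # last child is the leaf: cut it, clone the parent
--             return [t[:-1]] * (k + 1)
--
--     F = []                            # forest of root nodes
--     if n >= 0:
--         c = []
--         for _ in range(n):
--             c = [c]
--         F = [c]                       # one root with a chain of n descendants
--     k = 0
--     while F:
--         k += 1
--         t = F[-1]
--         if t:
--             F = F[:-1] + chop(t, k)
--         else:                         # rightmost root is a bare leaf
--             F = F[:-1]
--     return k
-- ===== Notes on version B (the rewrite author's own statement) =====
-- stated objective: alternative
-- what changed: B represents the hydra as an explicit tree of nested child-lists (one root with a chain of n descendants) and each step descends to the rightmost leaf's parent, cuts the leaf and splices in k+1 clones of that parent node, instead of A's flat depth-list with pop, backwards index scan and slice multiplication.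
import Mathlib
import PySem

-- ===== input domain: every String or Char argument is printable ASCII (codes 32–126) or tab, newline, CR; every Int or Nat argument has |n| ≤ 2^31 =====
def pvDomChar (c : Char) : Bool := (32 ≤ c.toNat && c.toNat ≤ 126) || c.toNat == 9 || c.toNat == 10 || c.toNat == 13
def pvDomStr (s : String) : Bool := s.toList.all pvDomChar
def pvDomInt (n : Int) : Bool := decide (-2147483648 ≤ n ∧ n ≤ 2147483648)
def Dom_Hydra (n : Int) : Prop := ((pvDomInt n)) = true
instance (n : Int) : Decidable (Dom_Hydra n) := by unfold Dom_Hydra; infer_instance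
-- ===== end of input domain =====

-- B re-implements the flat depth-list simulation as a tree (nested child-list) simulation;
-- same return value, no speed claim (the step count itself is astronomical for n ≥ 3).

-- ===== PORT A =====
-- A's while-loop terminates by the hydra theorem; the termination measure below assigns an
-- ordinal notation (ω^a·1 + b, as the computable ONote type) to the flat depth list by
-- parsing it as a preorder forest (cited in decreasing_by).
def ordH : List Int → ONote
  | [] => 0
  | x :: t =>
      ONote.oadd (ordH (t.takeWhile fun a => decide (x < a))) 1
        (ordH (t.dropWhile fun a => decide (x < a)))
termination_by l => l.length
decreasing_by
  · exact Nat.lt_succ_of_le (List.takeWhile_sublist _).length_le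
  · exact Nat.lt_succ_of_le (List.dropWhile_sublist _).length_le

lemma ordH_nil : (ordH []).repr = 0 := by rw [ordH]; rfl

lemma ordH_cons (x : Int) (t : List Int) :
    (ordH (x :: t)).repr =
      Ordinal.omega0 ^ (ordH (t.takeWhile fun a => decide (x < a))).repr
        + (ordH (t.dropWhile fun a => decide (x < a))).repr := by
  rw [ordH]
  simp [ONote.repr]

lemma dropWhile_head_not {p : Int → Bool} :
    ∀ {l : List Int} {x : Int} {r : List Int}, l.dropWhile p = x :: r → p x = false := by
  intro l
  induction l with
  | nil => intro x r h; simp [List.dropWhile] at h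
  | cons a t ih =>
      intro x r h
      by_cases hpa : p a = true
      · rw [List.dropWhile_cons_of_pos hpa] at h; exact ih h
      · rw [List.dropWhile_cons_of_neg hpa] at h
        cases h; simpa using hpa

lemma takeWhile_eq_self_of_dropWhile_nil {p : Int → Bool} {l : List Int}
    (h : l.dropWhile p = []) : l.takeWhile p = l := by
  have := List.takeWhile_append_dropWhile (p := p) (l := l)
  rw [h, List.append_nil] at this
  exact this

lemma ordH_append_single : ∀ (L : List Int) (a : Int), (ordH L).repr < (ordH (L ++ [a])).repr := by
  suffices H : ∀ (N : Nat) (L : List Int) (a : Int), L.length ≤ N → (ordH L).repr < (ordH (L ++ [a])).repr by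
    intro L a; exact H L.length L a le_rfl
  intro N
  induction N with
  | zero =>
      intro L a hL
      have : L = [] := List.eq_nil_of_length_eq_zero (Nat.le_zero.mp hL)
      subst this
      simp only [List.nil_append, ordH_nil, ordH_cons, List.takeWhile_nil, List.dropWhile_nil,
        Ordinal.opow_zero, add_zero]
      exact zero_lt_one
  | succ N ih =>
      intro L a hL
      cases L with
      | nil =>
          simp only [List.nil_append, ordH_nil, ordH_cons, List.takeWhile_nil, List.dropWhile_nil,
            Ordinal.opow_zero, add_zero]
          exact zero_lt_one
      | cons x t =>
          have hlt : t.length ≤ N := by simpa using hL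
          rw [List.cons_append, ordH_cons, ordH_cons]
          rcases hdw : t.dropWhile (fun b => decide (x < b)) with _ | ⟨y, r⟩
          · have htw : t.takeWhile (fun b => decide (x < b)) = t :=
              takeWhile_eq_self_of_dropWhile_nil hdw
            have hlen : (t.takeWhile fun b => decide (x < b)).length = t.length := by rw [htw]
            by_cases hxa : x < a
            · have htw2 : (t ++ [a]).takeWhile (fun b => decide (x < b)) = t ++ [a] := by
                rw [List.takeWhile_append, if_pos hlen]
                simp [List.takeWhile_cons, hxa]
              have hdw2 : (t ++ [a]).dropWhile (fun b => decide (x < b)) = [] := by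
                rw [List.dropWhile_append, hdw]
                simp [List.dropWhile_cons, hxa]
              simp only [htw2, hdw2, htw, hdw, ordH_nil, add_zero]
              exact (Ordinal.opow_lt_opow_iff_right Ordinal.one_lt_omega0).mpr (ih t a hlt)
            · have htw2 : (t ++ [a]).takeWhile (fun b => decide (x < b)) = t := by
                rw [List.takeWhile_append, if_pos hlen]
                simp [List.takeWhile_cons, hxa]
              have hdw2 : (t ++ [a]).dropWhile (fun b => decide (x < b)) = [a] := by
                rw [List.dropWhile_append, hdw]
                simp [List.dropWhile_cons, hxa]
              simp only [htw2, hdw2, htw, hdw, ordH_nil, add_zero]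
              have h1 : (0 : Ordinal) < (ordH [a]).repr := by
                rw [ordH_cons]
                simp only [List.takeWhile_nil, List.dropWhile_nil, ordH_nil, Ordinal.opow_zero,
                  add_zero]
                exact zero_lt_one
              calc Ordinal.omega0 ^ (ordH t).repr = Ordinal.omega0 ^ (ordH t).repr + 0 := (add_zero _).symm
                _ < Ordinal.omega0 ^ (ordH t).repr + (ordH [a]).repr := add_lt_add_right h1 _
          · have hlen : ¬ (t.takeWhile fun b => decide (x < b)).length = t.length := by
              have hlensum := congrArg List.length
                (List.takeWhile_append_dropWhile (p := fun b => decide (x < b)) (l := t))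
              rw [hdw] at hlensum
              simp only [List.length_append, List.length_cons] at hlensum
              omega
            have htw2 : (t ++ [a]).takeWhile (fun b => decide (x < b))
                = t.takeWhile (fun b => decide (x < b)) := by
              rw [List.takeWhile_append, if_neg hlen]
            have hdw2 : (t ++ [a]).dropWhile (fun b => decide (x < b)) = (y :: r) ++ [a] := by
              rw [List.dropWhile_append, hdw]; simp
            simp only [htw2, hdw2, hdw]
            apply add_lt_add_right
            have : (y :: r).length ≤ N := by
              have hsub := (List.dropWhile_sublist (l := t) (fun b => decide (x < b))).length_le
              rw [hdw] at hsub
              omega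
            exact ih (y :: r) a this

lemma ordH_lt_append (P : List Int) : ∀ (L : List Int), L ≠ [] → (ordH P).repr < (ordH (P ++ L)).repr := by
  intro L
  induction L using List.reverseRecOn with
  | nil => intro h; exact absurd rfl h
  | append_singleton M a ih =>
      intro _
      have h1 : (ordH P).repr ≤ (ordH (P ++ M)).repr := by
        by_cases hM : M = []
        · subst hM; simp
        · exact le_of_lt (ih hM)
      calc (ordH P).repr ≤ (ordH (P ++ M)).repr := h1
        _ < (ordH ((P ++ M) ++ [a])).repr := ordH_append_single _ _
        _ = (ordH (P ++ (M ++ [a]))).repr := by rw [List.append_assoc]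

lemma ordH_cut (v : Int) {X Y : List Int} (hXh : X.head? = some v) (hYh : Y.head? = some v)
    (hXm : ∀ a ∈ X, v ≤ a) (hYm : ∀ a ∈ Y, v ≤ a) (hlt : (ordH X).repr < (ordH Y).repr) :
    ∀ P : List Int, (ordH (P ++ X)).repr < (ordH (P ++ Y)).repr := by
  suffices H : ∀ (N : Nat) (P : List Int), P.length ≤ N → (ordH (P ++ X)).repr < (ordH (P ++ Y)).repr by
    intro P; exact H P.length P le_rfl
  obtain ⟨X', rfl⟩ : ∃ X', X = v :: X' := by
    cases X with
    | nil => simp at hXh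
    | cons a t => simp at hXh; exact ⟨t, by rw [hXh]⟩
  obtain ⟨Y', rfl⟩ : ∃ Y', Y = v :: Y' := by
    cases Y with
    | nil => simp at hYh
    | cons a t => simp at hYh; exact ⟨t, by rw [hYh]⟩
  intro N
  induction N with
  | zero =>
      intro P hP
      have : P = [] := List.eq_nil_of_length_eq_zero (Nat.le_zero.mp hP)
      subst this; simpa using hlt
  | succ N ih =>
      intro P hP
      cases P with
      | nil => simpa using hlt
      | cons p t =>
          have htN : t.length ≤ N := by simpa using hP
          rw [List.cons_append, List.cons_append, ordH_cons, ordH_cons]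
          rcases hdw : t.dropWhile (fun b => decide (p < b)) with _ | ⟨y, r⟩
          · have htw : t.takeWhile (fun b => decide (p < b)) = t :=
              takeWhile_eq_self_of_dropWhile_nil hdw
            have hlen : (t.takeWhile fun b => decide (p < b)).length = t.length := by rw [htw]
            by_cases hpv : p < v
            · -- the whole suffix lies strictly above p: it is swallowed by the exponent
              have hallX : ∀ a ∈ v :: X', decide (p < a) = true := by
                intro a ha; simp only [decide_eq_true_eq]
                exact lt_of_lt_of_le hpv (hXm a ha)
              have hallY : ∀ a ∈ v :: Y', decide (p < a) = true := by
                intro a ha; simp only [decide_eq_true_eq]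
                exact lt_of_lt_of_le hpv (hYm a ha)
              have htwX : (t ++ v :: X').takeWhile (fun b => decide (p < b)) = t ++ v :: X' := by
                rw [List.takeWhile_append, if_pos hlen,
                  List.takeWhile_eq_self_iff.mpr hallX]
              have hdwX : (t ++ v :: X').dropWhile (fun b => decide (p < b)) = [] := by
                rw [List.dropWhile_append, hdw]
                simp only [List.isEmpty_nil, if_true]
                exact List.dropWhile_eq_nil_iff.mpr hallX
              have htwY : (t ++ v :: Y').takeWhile (fun b => decide (p < b)) = t ++ v :: Y' := by
                rw [List.takeWhile_append, if_pos hlen,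
                  List.takeWhile_eq_self_iff.mpr hallY]
              have hdwY : (t ++ v :: Y').dropWhile (fun b => decide (p < b)) = [] := by
                rw [List.dropWhile_append, hdw]
                simp only [List.isEmpty_nil, if_true]
                exact List.dropWhile_eq_nil_iff.mpr hallY
              simp only [htwX, hdwX, htwY, hdwY, ordH_nil, add_zero]
              exact (Ordinal.opow_lt_opow_iff_right Ordinal.one_lt_omega0).mpr (ih t htN)
            · -- the suffix starts at or below p: it splits off whole
              have htwX : (t ++ v :: X').takeWhile (fun b => decide (p < b)) = t := by
                rw [List.takeWhile_append, if_pos hlen]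
                simp [hpv]
              have hdwX : (t ++ v :: X').dropWhile (fun b => decide (p < b)) = v :: X' := by
                rw [List.dropWhile_append, hdw]
                simp [hpv]
              have htwY : (t ++ v :: Y').takeWhile (fun b => decide (p < b)) = t := by
                rw [List.takeWhile_append, if_pos hlen]
                simp [hpv]
              have hdwY : (t ++ v :: Y').dropWhile (fun b => decide (p < b)) = v :: Y' := by
                rw [List.dropWhile_append, hdw]
                simp [hpv]
              simp only [htwX, hdwX, htwY, hdwY]
              exact add_lt_add_right hlt _
          · have hlen : ¬ (t.takeWhile fun b => decide (p < b)).length = t.length := by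
              have hlensum := congrArg List.length
                (List.takeWhile_append_dropWhile (p := fun b => decide (p < b)) (l := t))
              rw [hdw] at hlensum
              simp only [List.length_append, List.length_cons] at hlensum
              omega
            have hyrN : (y :: r).length ≤ N := by
              have hsub := (List.dropWhile_sublist (l := t) (fun b => decide (p < b))).length_le
              rw [hdw] at hsub
              omega
            have htwX : (t ++ v :: X').takeWhile (fun b => decide (p < b))
                = t.takeWhile (fun b => decide (p < b)) := by
              rw [List.takeWhile_append, if_neg hlen]
            have hdwX : (t ++ v :: X').dropWhile (fun b => decide (p < b))
                = (y :: r) ++ v :: X' := by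
              rw [List.dropWhile_append, hdw]; simp
            have htwY : (t ++ v :: Y').takeWhile (fun b => decide (p < b))
                = t.takeWhile (fun b => decide (p < b)) := by
              rw [List.takeWhile_append, if_neg hlen]
            have hdwY : (t ++ v :: Y').dropWhile (fun b => decide (p < b))
                = (y :: r) ++ v :: Y' := by
              rw [List.dropWhile_append, hdw]; simp
            simp only [htwX, hdwX, htwY, hdwY]
            apply add_lt_add_right
            simpa using ih (y :: r) hyrN

lemma ord_add_mul_nat (a : Ordinal) (u : Nat) : a + a * u = a * (u + 1 : Nat) := by
  have hcast : (1 : Ordinal) + (u : Ordinal) = ((u + 1 : Nat) : Ordinal) := by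
    rw [← Nat.cast_one (R := Ordinal), ← Nat.cast_add, Nat.add_comm]
  calc a + a * u = a * 1 + a * u := by rw [mul_one]
    _ = a * (1 + (u : Ordinal)) := (mul_add a 1 u).symm
    _ = a * ((u + 1 : Nat) : Ordinal) := by rw [hcast]

lemma ordH_flatten_replicate (v : Int) (S : List Int) (hS : ∀ a ∈ S, v < a) :
    ∀ u : Nat, (ordH ((List.replicate u (v :: S)).flatten)).repr = Ordinal.omega0 ^ (ordH S).repr * u := by
  intro u
  induction u with
  | zero => simp [ordH_nil]
  | succ w ih =>
      rw [List.replicate_succ, List.flatten_cons, List.cons_append, ordH_cons]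
      have hSall : ∀ a ∈ S, decide (v < a) = true := by
        intro a ha; simpa using hS a ha
      have htwS : S.takeWhile (fun b => decide (v < b)) = S :=
        List.takeWhile_eq_self_iff.mpr hSall
      have hdwS : S.dropWhile (fun b => decide (v < b)) = [] :=
        List.dropWhile_eq_nil_iff.mpr hSall
      have hrest_tw : ((List.replicate w (v :: S)).flatten).takeWhile
          (fun b => decide (v < b)) = [] := by
        cases w with
        | zero => simp
        | succ w' =>
            rw [List.replicate_succ, List.flatten_cons, List.cons_append]
            exact List.takeWhile_cons_of_neg (by simp)
      have hrest_dw : ((List.replicate w (v :: S)).flatten).dropWhile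
          (fun b => decide (v < b)) = (List.replicate w (v :: S)).flatten := by
        cases w with
        | zero => simp
        | succ w' =>
            rw [List.replicate_succ, List.flatten_cons, List.cons_append]
            exact List.dropWhile_cons_of_neg (by simp)
      have hlenS : (S.takeWhile fun b => decide (v < b)).length = S.length := by rw [htwS]
      rw [List.takeWhile_append, if_pos hlenS, hrest_tw, List.append_nil,
        List.dropWhile_append, hdwS]
      simp only [List.isEmpty_nil, if_true]
      rw [hrest_dw, ih]
      exact ord_add_mul_nat _ w

lemma pyRepeat_eq_flatten (xs : List Int) (m : Int) :
    PySem.List.pyRepeat xs m = (List.replicate m.toNat xs).flatten := by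
  simp [PySem.List.pyRepeat]

lemma step_decrease (P S : List Int) (v h : Int) (hvh : v < h) (hS : ∀ a ∈ S, h ≤ a) (u : Nat) :
    (ordH (P ++ (List.replicate u (v :: S)).flatten)).repr < (ordH ((P ++ (v :: S)) ++ [h])).repr := by
  have hRHS : (P ++ (v :: S)) ++ [h] = P ++ (v :: (S ++ [h])) := by simp
  rw [hRHS]
  have hS' : ∀ a ∈ S, v < a := fun a ha => lt_of_lt_of_le hvh (hS a ha)
  cases u with
  | zero => simpa using ordH_lt_append P (v :: (S ++ [h])) (by simp)
  | succ w =>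
      apply ordH_cut v (X := (List.replicate (w + 1) (v :: S)).flatten) (Y := v :: (S ++ [h]))
      · rw [List.replicate_succ, List.flatten_cons]; simp
      · simp
      · intro a ha
        rw [List.mem_flatten] at ha
        obtain ⟨l, hl, hal⟩ := ha
        rw [List.eq_of_mem_replicate hl] at hal
        rcases List.mem_cons.mp hal with rfl | hmem
        · exact le_rfl
        · exact le_of_lt (hS' a hmem)
      · intro a ha
        rcases List.mem_cons.mp ha with rfl | hmem
        · exact le_rfl
        · rcases List.mem_append.mp hmem with hmem' | hmem'
          · exact le_of_lt (hS' a hmem')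
          · rcases List.mem_singleton.mp hmem' with rfl
            exact le_of_lt hvh
      · -- ordinal comparison: ω^|S| · (w+1) < ω^|S++[h]|
        rw [ordH_flatten_replicate v S hS' (w + 1)]
        have hall : ∀ a ∈ S ++ [h], decide (v < a) = true := by
          intro a ha
          rcases List.mem_append.mp ha with hmem | hmem
          · simpa using hS' a hmem
          · rcases List.mem_singleton.mp hmem with rfl; simpa using hvh
        rw [ordH_cons, List.takeWhile_eq_self_iff.mpr hall,
          List.dropWhile_eq_nil_iff.mpr hall, ordH_nil, add_zero]
        have h1 : (ordH S).repr + 1 ≤ (ordH (S ++ [h])).repr :=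
          Order.add_one_le_iff.mpr (ordH_append_single S h)
        calc Ordinal.omega0 ^ (ordH S).repr * (w + 1 : Nat)
            < Ordinal.omega0 ^ (ordH S).repr * Ordinal.omega0 := by
              exact (mul_lt_mul_iff_of_pos_left
                (Ordinal.opow_pos _ Ordinal.omega0_pos)).mpr (Ordinal.natCast_lt_omega0 (w + 1))
          _ = Ordinal.omega0 ^ ((ordH S).repr + 1) := by
              rw [← Order.succ_eq_add_one, Ordinal.opow_succ]
          _ ≤ Ordinal.omega0 ^ (ordH (S ++ [h])).repr :=
              Ordinal.opow_le_opow_right Ordinal.omega0_pos h1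

lemma A_step_dec (H : List Int) (h x : Int) (r : List Int) (m : Int)
    (hg : H.getLast? = some h) (hvh : x < h)
    (hs : H.dropLast.reverse.dropWhile (fun a => decide (h ≤ a)) = x :: r) :
    ordH (r.reverse ++ PySem.List.pyRepeat
        (x :: ((H.dropLast.reverse.takeWhile fun a => decide (h ≤ a)).reverse)) m)
      < ordH H := by
  rw [ONote.lt_def]
  obtain ⟨l', rfl⟩ := List.getLast?_eq_some_iff.mp hg
  rw [List.dropLast_concat] at hs ⊢
  set s := l'.reverse.takeWhile (fun a => decide (h ≤ a)) with hsdef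
  have hsplit : l'.reverse = s ++ (x :: r) := by
    conv_lhs => rw [← List.takeWhile_append_dropWhile (p := fun a => decide (h ≤ a))
      (l := l'.reverse)]
    rw [hs]
  have hl' : l' = r.reverse ++ (x :: s.reverse) := by
    have h2 := congrArg List.reverse hsplit
    rw [List.reverse_reverse] at h2
    rw [h2]
    simp
  rw [pyRepeat_eq_flatten, hl']
  have hmem : ∀ a ∈ s.reverse, h ≤ a := by
    intro a ha
    rw [List.mem_reverse, hsdef] at ha
    simpa using List.mem_takeWhile_imp ha
  have := step_decrease r.reverse s.reverse x h hvh hmem m.toNat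
  simpa using this

lemma A_pop_dec (H : List Int) (h : Int) (hg : H.getLast? = some h) :
    ordH H.dropLast < ordH H := by
  rw [ONote.lt_def]
  obtain ⟨l', rfl⟩ := List.getLast?_eq_some_iff.mp hg
  rw [List.dropLast_concat]
  exact ordH_append_single l' h

-- port of A:  H = list(range(n+1)); k = 0
--   while H: k += 1; h = H.pop(); if h: ⟨scan i to the rightmost H[i] < h⟩; H[i:] *= k+1
-- the backwards index scan `i -= 1 while H[i] >= h` is transliterated as
-- takeWhile/dropWhile on the reversed list (identical element comparisons, same split).
def hydraLoop (H : List Int) (k : Int) : Int :=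
  if hH : H = [] then k
  else
    match hg : H.getLast? with
    | none => k            -- unreachable: H ≠ []
    | some h =>
      if h ≠ 0 then
        match hs : H.dropLast.reverse.dropWhile (fun a => decide (h ≤ a)) with
        | [] => k + 1      -- unreachable from Hydra's inputs: Python raises IndexError here
        | x :: r =>
            hydraLoop (r.reverse ++ PySem.List.pyRepeat
              (x :: ((H.dropLast.reverse.takeWhile fun a => decide (h ≤ a)).reverse)) (k + 1 + 1))
              (k + 1)
      else hydraLoop H.dropLast (k + 1)
termination_by ordH H
decreasing_by
  · exact A_step_dec H h x r (k + 1 + 1) hg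
      (by simpa using dropWhile_head_not hs) hs
  · exact A_pop_dec H h hg

def Hydra (n : Int) : Int := hydraLoop (PySem.List.pyRange 0 (n + 1) 1) 0

-- ===== PORT B =====
-- B's hydra: a node is the list of its children; a forest is a list of nodes.
-- Python's nested lists become the cons-tree Hyd (an element of a Hyd-list is itself a Hyd).
inductive Hyd : Type
  | nil : Hyd
  | cons : Hyd → Hyd → Hyd
deriving DecidableEq, Repr

def hydSize : Hyd → Nat
  | .nil => 1
  | .cons t r => hydSize t + hydSize r + 1

def hApp : Hyd → Hyd → Hyd
  | .nil, B => B
  | .cons t r, B => .cons t (hApp r B)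

def hLast? : Hyd → Option Hyd          -- F[-1]
  | .nil => none
  | .cons t r => if r = .nil then some t else hLast? r

def hDropLast : Hyd → Hyd              -- F[:-1]
  | .nil => .nil
  | .cons t r => if r = .nil then .nil else .cons t (hDropLast r)

def hReplA : Hyd → Nat → Hyd
  | _, 0 => .nil
  | node, u + 1 => .cons node (hReplA node u)

def hRepl (node : Hyd) (m : Int) : Hyd := hReplA node m.toNat   -- [node] * m

lemma hLast?_size : ∀ (F c : Hyd), hLast? F = some c → hydSize c < hydSize F := by
  intro F
  induction F with
  | nil => intro c h; simp [hLast?] at h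
  | cons t r iht ihr =>
      intro c h
      rw [hLast?] at h
      by_cases hr : r = .nil
      · rw [if_pos hr] at h
        cases h
        simp only [hydSize]; omega
      · rw [if_neg hr] at h
        have := ihr c h
        simp only [hydSize]; omega

-- B's chop(t, k): descend to the node whose last child is the leaf, cut it, clone the parent
def chop (t : Hyd) (k : Int) : Hyd :=
  match hc : hLast? t with
  | none => .nil           -- unreachable: chop is only called on non-empty nodes (Python t[-1])
  | some c =>
      if c ≠ .nil then .cons (hApp (hDropLast t) (chop c k)) .nil
      else hRepl (hDropLast t) (k + 1)
termination_by hydSize t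
decreasing_by exact hLast?_size t c hc

-- termination measure of B's while-loop: the standard forest ordinal
def ordT : Hyd → ONote
  | .nil => 0
  | .cons t r => ONote.oadd (ordT t) 1 (ordT r)

lemma ordT_nil : (ordT Hyd.nil).repr = 0 := by rw [ordT]; rfl

lemma ordT_cons (t r : Hyd) :
    (ordT (Hyd.cons t r)).repr = Ordinal.omega0 ^ (ordT t).repr + (ordT r).repr := by
  rw [ordT]
  simp [ONote.repr]

lemma hLast?_eq_none_iff : ∀ F : Hyd, hLast? F = none ↔ F = .nil := by
  intro F
  induction F with
  | nil => simp [hLast?]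
  | cons t r iht ihr =>
      rw [hLast?]
      by_cases hr : r = .nil
      · simp [hr]
      · rw [if_neg hr]
        simp [ihr, hr]
    
lemma ordT_lastSplit : ∀ (F c : Hyd), hLast? F = some c →
    (ordT F).repr = (ordT (hDropLast F)).repr + Ordinal.omega0 ^ (ordT c).repr := by
  intro F
  induction F with
  | nil => intro c h; simp [hLast?] at h
  | cons t r iht ihr =>
      intro c h
      rw [hLast?] at h
      by_cases hr : r = .nil
      · rw [if_pos hr] at h
        cases h
        subst hr
        simp [ordT_cons, ordT_nil, hDropLast]
      · rw [if_neg hr] at h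
        rw [ordT_cons, hDropLast, if_neg hr, ordT_cons, ihr c h, ← add_assoc]

lemma ordT_app : ∀ A B : Hyd, (ordT (hApp A B)).repr = (ordT A).repr + (ordT B).repr := by
  intro A
  induction A with
  | nil => intro B; simp [hApp, ordT_nil]
  | cons t r iht ihr => intro B; rw [hApp, ordT_cons, ordT_cons, ihr, ← add_assoc]

lemma ordT_replA (node : Hyd) : ∀ u : Nat,
    (ordT (hReplA node u)).repr = Ordinal.omega0 ^ (ordT node).repr * u := by
  intro u
  induction u with
  | zero => simp [hReplA, ordT_nil]
  | succ w ih => rw [hReplA, ordT_cons, ih]; exact ord_add_mul_nat _ w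

lemma hLast?_some (t : Hyd) (ht : t ≠ .nil) : ∃ c, hLast? t = some c := by
  rcases hc : hLast? t with _ | c
  · exact absurd ((hLast?_eq_none_iff t).mp hc) ht
  · exact ⟨c, rfl⟩

lemma chop_eq_leaf (t : Hyd) (κ : Int) (hc : hLast? t = some .nil) :
    chop t κ = hRepl (hDropLast t) (κ + 1) := by
  rw [chop, hc]; simp

lemma chop_eq_desc (t c : Hyd) (κ : Int) (hc : hLast? t = some c) (hcn : c ≠ .nil) :
    chop t κ = .cons (hApp (hDropLast t) (chop c κ)) .nil := by
  rw [chop, hc]; simp [hcn]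

lemma ordT_chop : ∀ (N : Nat) (t : Hyd), hydSize t ≤ N → t ≠ .nil → ∀ κ : Int,
    (ordT (chop t κ)).repr < Ordinal.omega0 ^ (ordT t).repr := by
  intro N
  induction N with
  | zero =>
      intro t hN
      cases t <;> simp [hydSize] at hN
  | succ N ih =>
      intro t hN ht κ
      obtain ⟨c, hc⟩ := hLast?_some t ht
      have hcN : hydSize c ≤ N := by
        have := hLast?_size t c hc
        omega
      by_cases hcn : c = .nil
      · subst hcn
        rw [chop_eq_leaf t κ hc, hRepl, ordT_replA,
          ordT_lastSplit t .nil hc]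
        calc Ordinal.omega0 ^ (ordT (hDropLast t)).repr * ((κ + 1).toNat : Ordinal)
            < Ordinal.omega0 ^ (ordT (hDropLast t)).repr * Ordinal.omega0 :=
              (mul_lt_mul_iff_of_pos_left
                (Ordinal.opow_pos _ Ordinal.omega0_pos)).mpr (Ordinal.natCast_lt_omega0 _)
          _ = Ordinal.omega0 ^ ((ordT (hDropLast t)).repr + 1) := by
              rw [← Order.succ_eq_add_one, Ordinal.opow_succ]
          _ = Ordinal.omega0 ^ ((ordT (hDropLast t)).repr + Ordinal.omega0 ^ (ordT Hyd.nil).repr) := by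
              rw [ordT_nil, Ordinal.opow_zero]
      · rw [chop_eq_desc t c κ hc hcn, ordT_cons, ordT_nil, add_zero, ordT_app,
          ordT_lastSplit t c hc]
        exact (Ordinal.opow_lt_opow_iff_right Ordinal.one_lt_omega0).mpr
          (add_lt_add_right (ih c hcN hcn κ) _)

lemma B_step_dec (F t : Hyd) (κ : Int) (hl : hLast? F = some t) (ht : t ≠ .nil) :
    ordT (hApp (hDropLast F) (chop t κ)) < ordT F := by
  rw [ONote.lt_def, ordT_app, ordT_lastSplit F t hl]
  exact add_lt_add_right (ordT_chop (hydSize t) t le_rfl ht κ) _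

lemma B_pop_dec (F t : Hyd) (hl : hLast? F = some t) : ordT (hDropLast F) < ordT F := by
  rw [ONote.lt_def, ordT_lastSplit F t hl]
  have : (0 : Ordinal) < Ordinal.omega0 ^ (ordT t).repr := Ordinal.opow_pos _ Ordinal.omega0_pos
  calc (ordT (hDropLast F)).repr = (ordT (hDropLast F)).repr + 0 := (add_zero _).symm
    _ < (ordT (hDropLast F)).repr + Ordinal.omega0 ^ (ordT t).repr := add_lt_add_right this _

-- B's main loop: F = forest of roots; while F: k += 1; t = F[-1];
--   if t: F = F[:-1] + chop(t, k)  else: F = F[:-1]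
def hydraLoopB (F : Hyd) (k : Int) : Int :=
  if hF : F = .nil then k
  else
    match hl : hLast? F with
    | none => k + 1        -- unreachable: F ≠ nil
    | some t =>
      if t ≠ .nil then hydraLoopB (hApp (hDropLast F) (chop t (k + 1))) (k + 1)
      else hydraLoopB (hDropLast F) (k + 1)
termination_by ordT F
decreasing_by
  · exact B_step_dec F t (k + 1) hl (by simpa using ‹_›)
  · exact B_pop_dec F t hl

def buildChain : Nat → Hyd            -- c = []; n times: c = [c]
  | 0 => .nil
  | u + 1 => .cons (buildChain u) .nil

def Hydra_alt (n : Int) : Int :=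
  hydraLoopB (if 0 ≤ n then Hyd.cons (buildChain n.toNat) Hyd.nil else Hyd.nil) 0

-- ===== PRECONDITION & SPEC =====
def Spec_Hydra (n : Int) (out : Int) : Prop := out = Hydra_alt n
instance (n : Int) (out : Int) : Decidable (Spec_Hydra n out) := by unfold Spec_Hydra; infer_instance

-- ===== CLAIM (what is proved, stated in full; the proofs are below) =====
def Claim_equal_Hydra : Prop := ∀ (n : Int), Dom_Hydra n → Spec_Hydra n (Hydra n)

-- ===== LEMMAS AND PROOFS =====

-- flatten a forest back to A's depth list: the simulation invariant
def flat (d : Int) : Hyd → List Int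
  | .nil => []
  | .cons t r => (d :: flat (d + 1) t) ++ flat d r

def rldNode (d : Int) : Hyd → Int      -- depth of the rightmost leaf of a node at depth d
  | .nil => d
  | .cons t r => if r = .nil then rldNode (d + 1) t else rldNode d r

lemma flat_app (A B : Hyd) : ∀ d, flat d (hApp A B) = flat d A ++ flat d B := by
  induction A with
  | nil => intro d; simp [hApp, flat]
  | cons t r iht ihr => intro d; rw [hApp, flat, flat, ihr, List.append_assoc]

lemma flat_lastSplit : ∀ (F c : Hyd), hLast? F = some c → ∀ d,
    flat d F = flat d (hDropLast F) ++ (d :: flat (d + 1) c) := by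
  intro F
  induction F with
  | nil => intro c h; simp [hLast?] at h
  | cons t r iht ihr =>
      intro c h d
      rw [hLast?] at h
      by_cases hr : r = .nil
      · rw [if_pos hr] at h
        cases h
        subst hr
        simp [flat, hDropLast]
      · rw [if_neg hr] at h
        rw [flat, hDropLast, if_neg hr, flat, ihr c h d, ← List.append_assoc]

lemma rld_lastSplit : ∀ (F c : Hyd), hLast? F = some c → ∀ d,
    rldNode d F = rldNode (d + 1) c := by
  intro F
  induction F with
  | nil => intro c h; simp [hLast?] at h
  | cons t r iht ihr =>
      intro c h d
      rw [hLast?] at h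
      by_cases hr : r = .nil
      · rw [if_pos hr] at h
        cases h
        rw [rldNode, if_pos hr]
      · rw [if_neg hr] at h
        rw [rldNode, if_neg hr, ihr c h d]

lemma flat_ge : ∀ (F : Hyd) (d a : Int), a ∈ flat d F → d ≤ a := by
  intro F
  induction F with
  | nil => intro d a h; simp [flat] at h
  | cons t r iht ihr =>
      intro d a h
      rw [flat] at h
      rcases List.mem_append.mp h with h' | h'
      · rcases List.mem_cons.mp h' with rfl | h''
        · exact le_rfl
        · linarith [iht (d + 1) a h'']
      · exact ihr d a h'

lemma flat_replA (node : Hyd) (d : Int) : ∀ u : Nat,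
    flat d (hReplA node u) = (List.replicate u (d :: flat (d + 1) node)).flatten := by
  intro u
  induction u with
  | zero => simp [hReplA, flat]
  | succ w ih => rw [hReplA, flat, ih, List.replicate_succ, List.flatten_cons]

-- one B-step (chop at the last node) is exactly one A-step on the flattened list
lemma chop_spec : ∀ (N : Nat) (t : Hyd), hydSize t ≤ N → t ≠ .nil → ∀ (d κ : Int) (P : List Int),
    ((P ++ (d :: flat (d + 1) t)).getLast? = some (rldNode d t)) ∧
    (d < rldNode d t) ∧
    ∃ x r,
      ((P ++ (d :: flat (d + 1) t)).dropLast.reverse.dropWhile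
          (fun a => decide (rldNode d t ≤ a)) = x :: r) ∧
      (r.reverse ++ PySem.List.pyRepeat
          (x :: (((P ++ (d :: flat (d + 1) t)).dropLast.reverse.takeWhile
            (fun a => decide (rldNode d t ≤ a))).reverse)) (κ + 1)
        = P ++ flat d (chop t κ)) := by
  intro N
  induction N with
  | zero =>
      intro t hN
      cases t <;> simp [hydSize] at hN
  | succ N ih =>
      intro t hN ht d κ P
      obtain ⟨c, hc⟩ := hLast?_some t ht
      have hcN : hydSize c ≤ N := by have := hLast?_size t c hc; omega
      have hflat : flat (d + 1) t = flat (d + 1) (hDropLast t) ++ ((d + 1) :: flat (d + 2) c) := by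
        have := flat_lastSplit t c hc (d + 1)
        simpa [add_assoc] using this
      have hrld : rldNode d t = rldNode (d + 1) c := rld_lastSplit t c hc d
      by_cases hcn : c = .nil
      · -- last child is the leaf: cut it and clone the parent (κ+1) times
        subst hcn
        have hrld' : rldNode d t = d + 1 := by rw [hrld, rldNode]
        set M := flat (d + 1) (hDropLast t) with hM
        have hflat2 : flat (d + 1) t = M ++ [d + 1] := by
          rw [hflat]; simp [flat]
        have hLeq : P ++ (d :: flat (d + 1) t) = (P ++ (d :: M)) ++ [d + 1] := by
          rw [hflat2]
          simp
        have hMg : ∀ a ∈ M.reverse, decide (d + 1 ≤ a) = true := by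
          intro a ha
          rw [List.mem_reverse] at ha
          simpa using flat_ge (hDropLast t) (d + 1) a ha
        refine ⟨?_, ?_, d, P.reverse, ?_, ?_⟩
        · rw [hLeq, hrld', List.getLast?_concat]
        · rw [hrld']; linarith
        · rw [hLeq, hrld', List.dropLast_concat]
          rw [List.reverse_append, List.reverse_cons, List.append_assoc,
            List.singleton_append]
          rw [List.dropWhile_append, List.dropWhile_eq_nil_iff.mpr hMg]
          simp only [List.isEmpty_nil, if_true]
          exact List.dropWhile_cons_of_neg (by simp)
        · rw [hLeq, hrld', List.dropLast_concat]
          rw [List.reverse_append, List.reverse_cons, List.append_assoc,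
            List.singleton_append]
          have hlenM : (M.reverse.takeWhile fun a => decide (d + 1 ≤ a)).length
              = M.reverse.length := by
            rw [List.takeWhile_eq_self_iff.mpr hMg]
          rw [List.takeWhile_append, if_pos hlenM,
            List.takeWhile_cons_of_neg (by simp), List.append_nil,
            List.reverse_reverse, List.reverse_reverse]
          rw [chop_eq_leaf t κ hc, hRepl, flat_replA, ← pyRepeat_eq_flatten, hM]
      · -- descend into the last child
        have hL : P ++ (d :: flat (d + 1) t)
            = (P ++ (d :: flat (d + 1) (hDropLast t))) ++ ((d + 1) :: flat (d + 2) c) := by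
          rw [hflat]; simp
        obtain ⟨hg, hdlt, x, r, hdw, heq⟩ :=
          ih c hcN hcn (d + 1) κ (P ++ (d :: flat (d + 1) (hDropLast t)))
        have hflatc : flat (d + 1 + 1) c = flat (d + 2) c := by
          have : d + 1 + 1 = d + 2 := by ring
          rw [this]
        rw [hflatc] at hg hdw heq
        refine ⟨?_, ?_, x, r, ?_, ?_⟩
        · rw [hL, hrld]; exact hg
        · rw [hrld]; linarith
        · rw [hL, hrld]; exact hdw
        · rw [hL, hrld, heq, chop_eq_desc t c κ hc hcn]
          rw [flat, flat_app, flat]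
          simp

lemma hydraLoop_nil (k : Int) : hydraLoop [] k = k := by
  rw [hydraLoop]; simp

lemma hydraLoop_zero (H : List Int) (k : Int) (hH : H ≠ []) (hg : H.getLast? = some 0) :
    hydraLoop H k = hydraLoop H.dropLast (k + 1) := by
  rw [hydraLoop]
  rw [dif_neg hH]
  split
  · rename_i heq; rw [hg] at heq; cases heq
  · rename_i h heq
    rw [hg] at heq
    cases heq
    simp

lemma hydraLoop_pos (H : List Int) (k h x : Int) (r : List Int) (hH : H ≠ [])
    (hg : H.getLast? = some h) (hne : h ≠ 0)
    (hs : H.dropLast.reverse.dropWhile (fun a => decide (h ≤ a)) = x :: r) :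
    hydraLoop H k = hydraLoop (r.reverse ++ PySem.List.pyRepeat
      (x :: ((H.dropLast.reverse.takeWhile fun a => decide (h ≤ a)).reverse)) (k + 1 + 1))
      (k + 1) := by
  rw [hydraLoop]
  rw [dif_neg hH]
  split
  · rename_i heq; rw [hg] at heq; cases heq
  · rename_i h' heq
    rw [hg] at heq
    cases heq
    rw [if_pos hne]
    split
    · rename_i heq2; rw [hs] at heq2; cases heq2
    · rename_i x' r' heq2
      rw [hs] at heq2
      cases heq2
      rfl

-- the loops agree on every forest
lemma loop_eq : ∀ (F : Hyd) (k : Int), hydraLoopB F k = hydraLoop (flat 0 F) k := by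
  intro F k
  induction F, k using hydraLoopB.induct with
  | case1 k => rw [flat, hydraLoop_nil, hydraLoopB]; simp
  | case2 F k hF hl =>
      exact absurd ((hLast?_eq_none_iff F).mp hl) hF
  | case3 F k hF t hl ht ih =>
      rw [hydraLoopB, dif_neg hF, hl]
      simp only [if_pos ht]
      rw [ih]
      have hsplit := flat_lastSplit F t hl 0
      rw [show (0 : Int) + 1 = 1 from by norm_num] at hsplit
      obtain ⟨hg, hdlt, x, r, hdw, heq⟩ :=
        chop_spec (hydSize t) t le_rfl ht 0 (k + 1) (flat 0 (hDropLast F))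
      rw [show (0 : Int) + 1 = 1 from by norm_num] at hg hdw heq
      have hne : rldNode 0 t ≠ 0 := by omega
      rw [hsplit, hydraLoop_pos (flat 0 (hDropLast F) ++ (0 :: flat 1 t)) k (rldNode 0 t) x r
        (by simp) hg hne hdw, heq, ← flat_app]
  | case4 F k hF t hl ht ih =>
      have htnil : t = .nil := by simpa using ht
      subst htnil
      rw [hydraLoopB, dif_neg hF, hl]
      simp only [if_neg ht]
      rw [ih]
      have hsplit := flat_lastSplit F .nil hl 0
      have hflatF : flat 0 F = flat 0 (hDropLast F) ++ [0] := by
        rw [hsplit]; simp [flat]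
      rw [hflatF, hydraLoop_zero (flat 0 (hDropLast F) ++ [0]) k (by simp)
        List.getLast?_concat, List.dropLast_concat]

lemma flat_chain : ∀ (u : Nat) (d : Int),
    d :: flat (d + 1) (buildChain u) = (List.range (u + 1)).map (fun i : Nat => d + (i : Int)) := by
  intro u
  induction u with
  | zero => intro d; simp [buildChain, flat]
  | succ w ih =>
      intro d
      rw [buildChain, flat, flat, List.append_nil, ih (d + 1)]
      conv_rhs => rw [List.range_succ_eq_map]
      rw [List.map_cons, List.map_map]
      congr 1
      · norm_num
      · apply List.map_congr_left
        intro i _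
        simp only [Function.comp_apply]
        push_cast
        ring

-- ===== VERDICT (by name: the statement is the Claim_ definition above) =====
theorem Hydra_spec : Claim_equal_Hydra := by
  unfold Claim_equal_Hydra
  intro n _
  unfold Spec_Hydra Hydra Hydra_alt
  by_cases hn : 0 ≤ n
  · rw [if_pos hn, loop_eq]
    have hlist : flat 0 (Hyd.cons (buildChain n.toNat) Hyd.nil)
        = PySem.List.pyRange 0 (n + 1) 1 := by
      rw [flat, flat, List.append_nil, flat_chain n.toNat 0, PySem.List.pyRange_one,
        show (n + 1 - 0).toNat = n.toNat + 1 from by omega]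
    rw [hlist]
  · rw [if_neg hn, loop_eq, flat]
    have hnil : PySem.List.pyRange 0 (n + 1) 1 = [] := by
      rw [PySem.List.pyRange_one, show (n + 1 - 0).toNat = 0 from by omega]
      simp
    rw [hnil]
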